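-- pv_equiv track=rewrite | github.com/wangxianh/exercise | pp_wxh.py | remove_internal_recycle
-- ===== SOURCE A (Python) =====
-- def remove_internal_recycle(tours): #去除那些有内部循环的路径
--     simple_tours = []
--     for tour in tours:
--         l = len(tour)
--         okay = True
--
--         for i in range(l):
--             n = tour[i]
--             #如果路径中某个结点重复出现
--             if n in tour[i+1:]:
--                 #如果没有内部循环则通过
--                 if i==0 and n not in tour[i+1:-1]:
--                     pass
--                 else:
--                     okay = False
--         if okay:
--             simple_tours.append(tour)
--
--     return simple_tours
-- ===== SOURCE B (Python) =====
-- def remove_internal_recycle(tours):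
--     simple_tours = []
--     for tour in tours:
--         core = tour[:-1] if tour and tour[0] == tour[-1] else tour
--         if len(set(core)) == len(core):
--             simple_tours.append(tour)
--     return simple_tours
-- ===== Notes on version B (the rewrite author's own statement) =====
-- stated objective: simpler
-- what changed: Replaces A's per-index inner scan with special-cased index 0 by a preprocessing step (strip the allowed closing repeat when tour[0]==tour[-1]) followed by a single uniform all-distinct check via len(set(core))==len(core).
import Mathlib
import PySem

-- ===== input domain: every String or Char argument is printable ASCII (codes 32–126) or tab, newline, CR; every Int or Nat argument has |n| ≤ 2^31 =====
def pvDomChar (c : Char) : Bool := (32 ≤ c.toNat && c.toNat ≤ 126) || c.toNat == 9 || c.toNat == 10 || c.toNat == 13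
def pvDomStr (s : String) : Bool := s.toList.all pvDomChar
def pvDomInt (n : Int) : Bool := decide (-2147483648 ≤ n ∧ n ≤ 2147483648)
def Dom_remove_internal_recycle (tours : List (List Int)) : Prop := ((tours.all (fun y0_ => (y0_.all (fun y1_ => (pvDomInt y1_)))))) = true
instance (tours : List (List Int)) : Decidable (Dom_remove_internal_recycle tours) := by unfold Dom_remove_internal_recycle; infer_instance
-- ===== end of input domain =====

-- B replaces A's per-index inner scan (with its special case at index 0) by stripping the
-- allowed closing repeat (tour[0] == tour[-1]) and one uniform all-distinct check (simpler).


-- ===== PORT A =====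
-- inner loop of A: the 'okay' flag after 'for i in range(l): …'
def pvOkay (tour : List Int) : Bool :=
  (PySem.List.pyRange 0 (tour.length : Int) 1).foldl (fun okay i =>
    let n := (PySem.List.pyGet? tour i).getD 0   -- i ∈ range(l), so the lookup never raises
    if n ∈ PySem.List.slice tour (some (i + 1)) none then
      if i = 0 ∧ n ∉ PySem.List.slice tour (some (i + 1)) (some (-1)) then okay
      else false
    else okay) true

def remove_internal_recycle (tours : List (List Int)) : List (List Int) :=
  tours.foldl (fun simple_tours tour =>
    if pvOkay tour then simple_tours ++ [tour] else simple_tours) []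

-- ===== PORT B =====
-- core = tour[:-1] if tour and tour[0] == tour[-1] else tour
def pvCore (tour : List Int) : List Int :=
  if tour ≠ [] ∧ tour.head? = tour.getLast? then tour.dropLast else tour

def remove_internal_recycle_alt (tours : List (List Int)) : List (List Int) :=
  tours.foldl (fun simple_tours tour =>
    if (PySem.Set.ofList (pvCore tour)).length = (pvCore tour).length then simple_tours ++ [tour]
    else simple_tours) []

-- ===== PRECONDITION & SPEC =====
def Spec_remove_internal_recycle (tours : List (List Int)) (out : List (List Int)) : Prop := out = remove_internal_recycle_alt tours
instance (tours : List (List Int)) (out : List (List Int)) : Decidable (Spec_remove_internal_recycle tours out) := by unfold Spec_remove_internal_recycle; infer_instance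

-- ===== CLAIM (what is proved, stated in full; the proofs are below) =====
def Claim_equal_remove_internal_recycle : Prop := ∀ (tours : List (List Int)), Dom_remove_internal_recycle tours → Spec_remove_internal_recycle tours (remove_internal_recycle tours)

-- ===== LEMMAS AND PROOFS =====

lemma dropLast_drop_comm (l : List Int) (i : Nat) : l.dropLast.drop i = (l.drop i).dropLast := by
  rw [List.dropLast_eq_take, List.dropLast_eq_take, List.drop_take, List.length_drop]
  congr 1; omega

lemma mem_drop_iff (xs : List Int) (n : Nat) (x : Int) :
    x ∈ xs.drop n ↔ ∃ j, ∃ h : j < xs.length, n ≤ j ∧ xs[j] = x := by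
  rw [List.mem_iff_getElem]
  constructor
  · rintro ⟨i, hi, he⟩
    have hl : n + i < xs.length := by
      have := hi; simp only [List.length_drop] at this; omega
    exact ⟨n + i, hl, by omega, by rw [List.getElem_drop] at he; exact he⟩
  · rintro ⟨j, hj, hnj, he⟩
    have hji : j - n < (xs.drop n).length := by simp only [List.length_drop]; omega
    refine ⟨j - n, hji, ?_⟩
    rw [List.getElem_drop]
    have hnn : n + (j - n) = j := by omega
    simp only [hnn]; exact he

lemma nodup_iff_drop (xs : List Int) :
    xs.Nodup ↔ ∀ k (h : k < xs.length), xs[k] ∉ xs.drop (k + 1) := by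
  unfold List.Nodup
  rw [List.pairwise_iff_getElem]
  constructor
  · intro hnd k h hmem
    rcases (mem_drop_iff xs (k + 1) xs[k]).1 hmem with ⟨j, hj, hkj, he⟩
    exact hnd k j h hj (by omega) he.symm
  · intro H i j hi hj hij he
    exact H i hi ((mem_drop_iff xs (i + 1) xs[i]).2 ⟨j, hj, by omega, he.symm⟩)

-- set(xs) has as many elements as xs iff xs has no duplicate
lemma ofList_sublist (xs : List Int) : (PySem.Set.ofList xs).Sublist xs := by
  induction xs using List.reverseRecOn with
  | nil => simp [PySem.Set.ofList_nil]
  | append_singleton ys y ih =>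
    rw [PySem.Set.ofList_append_singleton, PySem.Set.add_eq_ite]
    split
    · exact ih.trans (List.sublist_append_left ys [y])
    · exact ih.append (List.Sublist.refl [y])

lemma length_ofList_eq_iff (xs : List Int) :
    (PySem.Set.ofList xs).length = xs.length ↔ xs.Nodup := by
  constructor
  · intro h
    have he := (ofList_sublist xs).eq_of_length h
    rw [← he]; exact PySem.Set.nodup_ofList xs
  · intro h; rw [PySem.Set.ofList_eq_self_of_nodup xs h]

-- tour[i+1:-1] for a natural i is tour.dropLast.drop (i+1)  (exact: slice clamps, like Python)
lemma slice_natCast_neg_one (xs : List Int) (a : Nat) :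
    PySem.List.slice xs (some ((a : Nat) : Int)) (some (-1)) = xs.dropLast.drop a := by
  simp only [PySem.List.slice, PySem.List.clampIdx]
  have hm1 : ((-1 : Int) < 0) := by norm_num
  have ha : ¬ ((a : Int) < 0) := by omega
  rw [if_pos hm1, if_neg ha]
  simp only [Int.toNat_natCast]
  rcases Nat.eq_zero_or_pos xs.length with h0 | h0
  · have hxs : xs = [] := List.length_eq_zero_iff.1 h0
    subst hxs; simp
  · have hneg : ¬ ((xs.length : Int) + -1 < 0) := by omega
    rw [if_neg hneg]
    rw [List.dropLast_eq_take, List.drop_take]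
    have h2 : ((xs.length : Int) + -1).toNat = xs.length - 1 := by omega
    rw [h2]
    rcases le_or_gt a xs.length with hle | hgt
    · rw [min_eq_left hle]
    · have hmin : min a xs.length = xs.length := by omega
      rw [hmin]
      have hz : xs.length - 1 - xs.length = 0 := by omega
      rw [hz, List.take_zero]
      rw [List.drop_eq_nil_of_le (le_of_lt hgt), List.take_nil]

-- the flag-accumulating fold is an 'all'
lemma foldl_flag (f : Int → Bool) (step : Bool → Int → Bool)
    (hstep : ∀ b i, step b i = (b && f i)) :
    ∀ (xs : List Int) (b : Bool), xs.foldl step b = (b && xs.all f) := by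
  intro xs
  induction xs with
  | nil => simp
  | cons x xs ih =>
    intro b
    simp only [List.foldl_cons, List.all_cons, hstep, ih, Bool.and_assoc]

-- A's inner loop, characterised index-wise
lemma pvOkay_iff (tour : List Int) :
    pvOkay tour = true ↔
      ∀ k (h : k < tour.length),
        tour[k] ∉ tour.drop (k + 1) ∨ (k = 0 ∧ tour[k] ∉ tour.dropLast.drop (k + 1)) := by
  have hstep : ∀ (b : Bool) (i : Int),
      (fun okay i =>
        let n := (PySem.List.pyGet? tour i).getD 0
        if n ∈ PySem.List.slice tour (some (i + 1)) none then
          if i = 0 ∧ n ∉ PySem.List.slice tour (some (i + 1)) (some (-1)) then okay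
          else false
        else okay) b i
      = (b && decide ((PySem.List.pyGet? tour i).getD 0 ∉ PySem.List.slice tour (some (i + 1)) none ∨
          (i = 0 ∧ (PySem.List.pyGet? tour i).getD 0 ∉ PySem.List.slice tour (some (i + 1)) (some (-1))))) := by
    intro b i
    dsimp only
    split_ifs with hA hB
    · have hd : decide ((PySem.List.pyGet? tour i).getD 0 ∉ PySem.List.slice tour (some (i + 1)) none ∨
          (i = 0 ∧ (PySem.List.pyGet? tour i).getD 0 ∉ PySem.List.slice tour (some (i + 1)) (some (-1)))) = true := by
        simp only [decide_eq_true_eq]; exact Or.inr hB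
      rw [hd, Bool.and_true]
    · have hd : decide ((PySem.List.pyGet? tour i).getD 0 ∉ PySem.List.slice tour (some (i + 1)) none ∨
          (i = 0 ∧ (PySem.List.pyGet? tour i).getD 0 ∉ PySem.List.slice tour (some (i + 1)) (some (-1)))) = false := by
        simp only [decide_eq_false_iff_not]
        exact not_or.2 ⟨not_not_intro hA, hB⟩
      rw [hd, Bool.and_false]
    · have hd : decide ((PySem.List.pyGet? tour i).getD 0 ∉ PySem.List.slice tour (some (i + 1)) none ∨
          (i = 0 ∧ (PySem.List.pyGet? tour i).getD 0 ∉ PySem.List.slice tour (some (i + 1)) (some (-1)))) = true := by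
        simp only [decide_eq_true_eq]; exact Or.inl hA
      rw [hd, Bool.and_true]
  have hpt : ∀ (k : Nat) (h : k < tour.length),
      (((PySem.List.pyGet? tour (k : Int)).getD 0 ∉ PySem.List.slice tour (some ((k : Int) + 1)) none) ∨
        ((k : Int) = 0 ∧ (PySem.List.pyGet? tour (k : Int)).getD 0 ∉ PySem.List.slice tour (some ((k : Int) + 1)) (some (-1))))
      ↔ (tour[k] ∉ tour.drop (k + 1) ∨ (k = 0 ∧ tour[k] ∉ tour.dropLast.drop (k + 1))) := by
    intro k h
    have e1 : (PySem.List.pyGet? tour (k : Int)).getD 0 = tour[k] := by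
      rw [PySem.List.pyGet?_natCast, List.getElem?_eq_getElem h]; rfl
    have hcast : ((k : Int) + 1) = (((k + 1 : Nat)) : Int) := by push_cast; ring
    rw [e1, hcast, PySem.List.slice_from_natCast, slice_natCast_neg_one]
    simp only [Int.natCast_eq_zero]
  unfold pvOkay
  rw [foldl_flag _ _ hstep, Bool.true_and, PySem.List.pyRange_one, List.all_map, List.all_eq_true]
  simp only [Function.comp, List.mem_range, Int.sub_zero, Int.toNat_natCast, zero_add,
    decide_eq_true_eq]
  constructor
  · intro H k h
    exact (hpt k h).1 (H k h)
  · intro H k h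
    exact (hpt k h).2 (H k h)

-- the heart: A's indexed condition ⟺ the stripped core has no duplicate
lemma main_iff (tour : List Int) :
    (∀ k (h : k < tour.length),
        tour[k] ∉ tour.drop (k + 1) ∨ (k = 0 ∧ tour[k] ∉ tour.dropLast.drop (k + 1)))
      ↔ (pvCore tour).Nodup := by
  rcases eq_or_ne tour [] with hnil | hne
  · subst hnil; simp [pvCore]
  · have hlen : 0 < tour.length := List.length_pos_iff.2 hne
    have hlastlt : tour.length - 1 < tour.length := by omega
    have hhead : tour.head? = some (tour[0]'hlen) := by
      rw [List.head?_eq_getElem?, List.getElem?_eq_getElem hlen]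
    have hlast : tour.getLast? = some (tour[tour.length - 1]'hlastlt) := by
      rw [List.getLast?_eq_getElem?, List.getElem?_eq_getElem hlastlt]
    have hdl : tour.dropLast.length = tour.length - 1 := List.length_dropLast
    have hget : ∀ (k : Nat) (h : k < tour.dropLast.length),
        tour.dropLast[k] = tour[k]'(by omega) := fun k h => List.getElem_dropLast ..
    have hdecomp : tour.dropLast ++ [tour[tour.length - 1]'hlastlt] = tour := by
      have hd := List.dropLast_append_getLast hne
      rwa [List.getLast_eq_getElem] at hd
    by_cases heq : tour[0]'hlen = tour[tour.length - 1]'hlastlt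
    · -- closed tour: core = dropLast
      have hcore : pvCore tour = tour.dropLast := by
        unfold pvCore; rw [if_pos ⟨hne, by rw [hhead, hlast, heq]⟩]
      rw [hcore, nodup_iff_drop]
      rcases eq_or_ne tour.length 1 with h1 | h1
      · constructor
        · intro _ k h
          rw [hdl] at h; omega
        · intro _ k h
          left
          rw [List.drop_eq_nil_of_le (by omega)]
          exact List.not_mem_nil
      · have h2 : 2 ≤ tour.length := by omega
        constructor
        · intro H k h
          by_cases hk0 : k = 0
          · subst hk0
            rcases H 0 hlen with hc | hc
            · exact absurd ((mem_drop_iff tour 1 _).2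
                ⟨tour.length - 1, hlastlt, by omega, heq.symm⟩) hc
            · rw [hget 0 h]; exact hc.2
          · rcases H k (by omega) with hc | hc
            · intro hmem
              apply hc
              rw [hget k h] at hmem
              have hsub : List.Sublist (tour.dropLast.drop (k + 1)) (tour.drop (k + 1)) := by
                rw [dropLast_drop_comm]
                exact List.dropLast_sublist _
              exact hsub.subset hmem
            · exact absurd hc.1 hk0
        · intro H k h
          by_cases hk0 : k = 0
          · subst hk0
            right
            refine ⟨rfl, ?_⟩
            have h0 : 0 < tour.dropLast.length := by omega
            have hh := H 0 h0
            rwa [hget 0 h0] at hh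
          · rcases eq_or_ne k (tour.length - 1) with hkl | hkl
            · left
              rw [List.drop_eq_nil_of_le (by omega)]
              exact List.not_mem_nil
            · left
              have hkdl : k < tour.dropLast.length := by omega
              intro hmem
              have hdrop : tour.drop (k + 1)
                  = tour.dropLast.drop (k + 1) ++ [tour[tour.length - 1]'hlastlt] := by
                conv_lhs => rw [← hdecomp]
                exact List.drop_append_of_le_length (by omega)
              rw [hdrop, List.mem_append, List.mem_singleton] at hmem
              rcases hmem with hmem | hmem
              · exact H k hkdl (by rwa [hget k hkdl])
              · apply H 0 (by omega)
                rw [hget 0 (by omega)]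
                exact (mem_drop_iff _ 1 _).2 ⟨k, hkdl, by omega, by rw [hget k hkdl, hmem, ← heq]⟩
    · -- open tour: core = tour
      have hcore : pvCore tour = tour := by
        unfold pvCore
        rw [if_neg]
        rintro ⟨-, habs⟩
        rw [hhead, hlast] at habs
        exact heq (Option.some_injective _ habs)
      rw [hcore, nodup_iff_drop]
      constructor
      · intro H k h
        rcases H k h with hc | hc
        · exact hc
        · obtain ⟨hk0, hnotin⟩ := hc
          subst hk0
          intro hmem
          rcases (mem_drop_iff tour 1 _).1 hmem with ⟨j, hj, h1j, hje⟩
          rcases eq_or_ne j (tour.length - 1) with hjl | hjl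
          · subst hjl; exact heq hje.symm
          · apply hnotin
            have hjdl : j < tour.dropLast.length := by omega
            exact (mem_drop_iff _ 1 _).2 ⟨j, hjdl, by omega, by rw [hget j hjdl, hje]⟩
      · intro H k h
        exact Or.inl (H k h)

-- per-tour agreement of the two keep-conditions
lemma keep_iff (tour : List Int) :
    (pvOkay tour = true) ↔ (PySem.Set.ofList (pvCore tour)).length = (pvCore tour).length := by
  rw [pvOkay_iff, main_iff, length_ofList_eq_iff]

lemma fold_eq (tours : List (List Int)) :
    ∀ acc, tours.foldl (fun s t => if pvOkay t then s ++ [t] else s) acc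
      = tours.foldl
          (fun s t => if (PySem.Set.ofList (pvCore t)).length = (pvCore t).length then s ++ [t]
            else s) acc := by
  induction tours with
  | nil => intro acc; rfl
  | cons t ts ih =>
    intro acc
    simp only [List.foldl_cons]
    rw [if_congr (Iff.trans (by simp) (keep_iff t)) rfl rfl, ih]

-- ===== VERDICT (by name: the statement is the Claim_ definition above) =====
theorem remove_internal_recycle_spec : Claim_equal_remove_internal_recycle := by
  intro tours _
  unfold Spec_remove_internal_recycle remove_internal_recycle remove_internal_recycle_alt
  exact fold_eq tours []
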